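-- pv_equiv track=rewrite | github.com/yazeedmshayekh2/Prometheus | main.py | _ensure_question_diversity
-- ===== SOURCE A (Python) =====
-- from typing import Dict, List, Any, Optional, Iterator, Tuple, Union
--
-- def _ensure_question_diversity(questions: List[str]) -> List[str]:
--     """Ensure diversity in the question set"""
--     if not questions:
--         return []
--
--     diverse_questions = []
--     categories = {
--         'coverage': [],
--         'cost': [],
--         'process': [],
--         'limitation': [],
--         'network': []
--     }
--
--     # Categorize questions
--     for q in questions:
--         q_lower = q.lower()
--         if any(word in q_lower for word in ['cover', 'benefit', 'include']):
--             categories['coverage'].append(q)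
--         elif any(word in q_lower for word in ['cost', 'pay', 'charge', 'fee', 'deductible']):
--             categories['cost'].append(q)
--         elif any(word in q_lower for word in ['process', 'submit', 'claim', 'apply']):
--             categories['process'].append(q)
--         elif any(word in q_lower for word in ['limit', 'restrict', 'exclude']):
--             categories['limitation'].append(q)
--         elif any(word in q_lower for word in ['network', 'provider', 'facility']):
--             categories['network'].append(q)
--         else:
--             diverse_questions.append(q)
--
--     # Add diverse selection from each category
--     for category_questions in categories.values():
--         if category_questions:
--             diverse_questions.extend(category_questions[:3])  # Take up to 3 from each category
--
--     return diverse_questions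
-- ===== SOURCE B (Python) =====
-- _KEYWORDS = [
--     ['cover', 'benefit', 'include'],
--     ['cost', 'pay', 'charge', 'fee', 'deductible'],
--     ['process', 'submit', 'claim', 'apply'],
--     ['limit', 'restrict', 'exclude'],
--     ['network', 'provider', 'facility'],
-- ]
--
--
-- def _category(q):
--     """Index of the first keyword group matching q (case-insensitive), or -1."""
--     ql = q.lower()
--     for i, words in enumerate(_KEYWORDS):
--         if any(w in ql for w in words):
--             return i
--     return -1
--
--
-- def _ensure_question_diversity(questions):
--     """Ensure diversity in the question set: staged filter passes over a pure
--     category function instead of accumulating mutable buckets."""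
--     result = [q for q in questions if _category(q) == -1]
--     for i in range(len(_KEYWORDS)):
--         result += [q for q in questions if _category(q) == i][:3]
--     return result
-- ===== Notes on version B (the rewrite author's own statement) =====
-- stated objective: alternative
-- what changed: B drops A's single categorizing pass that mutates a dict of buckets: it defines a pure category-index function and builds the output by staged filter passes (one filter for uncategorized questions, then one filter plus take-3 per category), maintaining no buckets at all.
import Mathlib
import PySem

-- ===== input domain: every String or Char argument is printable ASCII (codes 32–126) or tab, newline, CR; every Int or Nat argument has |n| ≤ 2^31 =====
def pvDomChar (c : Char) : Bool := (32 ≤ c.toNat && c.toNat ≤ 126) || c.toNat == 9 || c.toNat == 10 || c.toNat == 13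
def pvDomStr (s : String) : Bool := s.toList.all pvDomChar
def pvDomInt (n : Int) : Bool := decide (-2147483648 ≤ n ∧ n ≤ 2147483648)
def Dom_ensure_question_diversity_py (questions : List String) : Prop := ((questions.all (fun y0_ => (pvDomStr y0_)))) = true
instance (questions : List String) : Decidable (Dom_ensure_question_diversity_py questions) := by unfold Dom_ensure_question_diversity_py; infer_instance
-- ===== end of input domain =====

-- B replaces A's single mutating bucket-accumulation pass with staged filter passes over a
-- pure category-index function (objective: alternative; no buckets are maintained).

-- ===== PORT A =====
-- any(word in q_lower for word in ws)
def pvMatch (ws : List String) (ql : String) : Bool := ws.any (fun w => PySem.Str.isIn w ql)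

-- one iteration of A's categorization loop; state = (diverse_questions, categories dict)
def pvStepA (st : List String × PySem.Dict String (List String)) (q : String) :
    List String × PySem.Dict String (List String) :=
  let dq := st.1
  let cats := st.2
  let ql := PySem.Str.lower q
  if pvMatch ["cover", "benefit", "include"] ql then
    (dq, cats.modify "coverage" [] (fun l => l ++ [q]))
  else if pvMatch ["cost", "pay", "charge", "fee", "deductible"] ql then
    (dq, cats.modify "cost" [] (fun l => l ++ [q]))
  else if pvMatch ["process", "submit", "claim", "apply"] ql then
    (dq, cats.modify "process" [] (fun l => l ++ [q]))
  else if pvMatch ["limit", "restrict", "exclude"] ql then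
    (dq, cats.modify "limitation" [] (fun l => l ++ [q]))
  else if pvMatch ["network", "provider", "facility"] ql then
    (dq, cats.modify "network" [] (fun l => l ++ [q]))
  else (dq ++ [q], cats)

-- A's final loop over categories.values()
def pvFinA (r : List String × PySem.Dict String (List String)) : List String :=
  r.2.values.foldl
    (fun dq cq => if cq ≠ [] then dq ++ PySem.List.slice cq none (some 3) else dq) r.1

def ensure_question_diversity_py (questions : List String) : List String :=
  if questions = [] then []
  else
    pvFinA (questions.foldl pvStepA
      ([], PySem.Dict.mk [("coverage", []), ("cost", []), ("process", []),
                          ("limitation", []), ("network", [])]))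

-- ===== PORT B =====
-- _KEYWORDS
def pvTable : List (List String) :=
  [["cover", "benefit", "include"],
   ["cost", "pay", "charge", "fee", "deductible"],
   ["process", "submit", "claim", "apply"],
   ["limit", "restrict", "exclude"],
   ["network", "provider", "facility"]]

-- _category: index of the first matching keyword group, or -1 (enumerate + early return)
def pvCat (q : String) : Int :=
  let ql := PySem.Str.lower q
  match pvTable.findIdx? (fun ws => pvMatch ws ql) with
  | some i => (i : Int)
  | none => -1

def ensure_question_diversity_py_alt (questions : List String) : List String :=
  let result := questions.filter (fun q => pvCat q == -1)
  (PySem.List.pyRange 0 (pvTable.length : Int) 1).foldl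
    (fun res i =>
      res ++ PySem.List.slice (questions.filter (fun q => pvCat q == i)) none (some 3))
    result

-- ===== PRECONDITION & SPEC =====
def Spec_ensure_question_diversity_py (questions : List String) (out : List String) : Prop := out = ensure_question_diversity_py_alt questions
instance (questions : List String) (out : List String) : Decidable (Spec_ensure_question_diversity_py questions out) := by unfold Spec_ensure_question_diversity_py; infer_instance

-- ===== CLAIM (what is proved, stated in full; the proofs are below) =====
def Claim_equal_ensure_question_diversity_py : Prop := ∀ (questions : List String), Dom_ensure_question_diversity_py questions → Spec_ensure_question_diversity_py questions (ensure_question_diversity_py questions)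

-- ===== LEMMAS AND PROOFS =====

-- the mk-shaped dict A's loop preserves
def pvMkD (c1 c2 c3 c4 c5 : List String) : PySem.Dict String (List String) :=
  PySem.Dict.mk [("coverage", c1), ("cost", c2), ("process", c3),
                 ("limitation", c4), ("network", c5)]

-- A guards the extend with `if category_questions:`; extending by a slice of [] is a no-op
lemma pvTakeIf (o c : List String) :
    (if c ≠ [] then o ++ PySem.List.slice c none (some 3) else o)
      = o ++ PySem.List.slice c none (some 3) := by
  split_ifs with h
  · rfl
  · simp only [ne_eq, not_not] at h
    subst h
    simp [PySem.List.slice]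

-- characterization of A's fold state by B's pure category function
lemma pvFold (qs : List String) : ∀ (dq c1 c2 c3 c4 c5 : List String),
    qs.foldl pvStepA (dq, pvMkD c1 c2 c3 c4 c5)
      = (dq ++ qs.filter (fun q => pvCat q == -1),
         pvMkD (c1 ++ qs.filter (fun q => pvCat q == 0))
               (c2 ++ qs.filter (fun q => pvCat q == 1))
               (c3 ++ qs.filter (fun q => pvCat q == 2))
               (c4 ++ qs.filter (fun q => pvCat q == 3))
               (c5 ++ qs.filter (fun q => pvCat q == 4))) := by
  induction qs with
  | nil => intro dq c1 c2 c3 c4 c5; simp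
  | cons q qs ih =>
      intro dq c1 c2 c3 c4 c5
      rw [List.foldl_cons]
      by_cases h1 : pvMatch ["cover", "benefit", "include"] (PySem.Str.lower q) = true
      · have hc : pvCat q = 0 := by simp [pvCat, pvTable, List.findIdx?_cons, h1]
        rw [show pvStepA (dq, pvMkD c1 c2 c3 c4 c5) q = (dq, pvMkD (c1 ++ [q]) c2 c3 c4 c5) from
          by simp [pvStepA, pvMkD, h1, PySem.Dict.modify, PySem.Dict.contains, PySem.Dict.insert,
                   PySem.Dict.getD, PySem.Dict.get?], ih]
        simp [hc]
      · by_cases h2 : pvMatch ["cost", "pay", "charge", "fee", "deductible"] (PySem.Str.lower q) = true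
        · have hc : pvCat q = 1 := by simp [pvCat, pvTable, List.findIdx?_cons, h1, h2]
          rw [show pvStepA (dq, pvMkD c1 c2 c3 c4 c5) q = (dq, pvMkD c1 (c2 ++ [q]) c3 c4 c5) from
            by simp [pvStepA, pvMkD, h1, h2, PySem.Dict.modify, PySem.Dict.contains,
                     PySem.Dict.insert, PySem.Dict.getD, PySem.Dict.get?], ih]
          simp [hc]
        · by_cases h3 : pvMatch ["process", "submit", "claim", "apply"] (PySem.Str.lower q) = true
          · have hc : pvCat q = 2 := by simp [pvCat, pvTable, List.findIdx?_cons, h1, h2, h3]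
            rw [show pvStepA (dq, pvMkD c1 c2 c3 c4 c5) q = (dq, pvMkD c1 c2 (c3 ++ [q]) c4 c5) from
              by simp [pvStepA, pvMkD, h1, h2, h3, PySem.Dict.modify, PySem.Dict.contains,
                       PySem.Dict.insert, PySem.Dict.getD, PySem.Dict.get?], ih]
            simp [hc]
          · by_cases h4 : pvMatch ["limit", "restrict", "exclude"] (PySem.Str.lower q) = true
            · have hc : pvCat q = 3 := by simp [pvCat, pvTable, List.findIdx?_cons, h1, h2, h3, h4]
              rw [show pvStepA (dq, pvMkD c1 c2 c3 c4 c5) q = (dq, pvMkD c1 c2 c3 (c4 ++ [q]) c5) from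
                by simp [pvStepA, pvMkD, h1, h2, h3, h4, PySem.Dict.modify, PySem.Dict.contains,
                         PySem.Dict.insert, PySem.Dict.getD, PySem.Dict.get?], ih]
              simp [hc]
            · by_cases h5 : pvMatch ["network", "provider", "facility"] (PySem.Str.lower q) = true
              · have hc : pvCat q = 4 := by
                  simp [pvCat, pvTable, List.findIdx?_cons, h1, h2, h3, h4, h5]
                rw [show pvStepA (dq, pvMkD c1 c2 c3 c4 c5) q = (dq, pvMkD c1 c2 c3 c4 (c5 ++ [q])) from
                  by simp [pvStepA, pvMkD, h1, h2, h3, h4, h5, PySem.Dict.modify, PySem.Dict.contains,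
                           PySem.Dict.insert, PySem.Dict.getD, PySem.Dict.get?], ih]
                simp [hc]
              · have hc : pvCat q = -1 := by
                  simp [pvCat, pvTable, List.findIdx?_cons, h1, h2, h3, h4, h5]
                rw [show pvStepA (dq, pvMkD c1 c2 c3 c4 c5) q = (dq ++ [q], pvMkD c1 c2 c3 c4 c5) from
                  by simp [pvStepA, pvMkD, h1, h2, h3, h4, h5], ih]
                simp [hc]

-- ===== VERDICT (by name: the statement is the Claim_ definition above) =====
theorem ensure_question_diversity_py_spec : Claim_equal_ensure_question_diversity_py := by
  intro questions _
  unfold Spec_ensure_question_diversity_py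
  cases questions with
  | nil => decide
  | cons q qs =>
      rw [ensure_question_diversity_py, if_neg (by simp)]
      show pvFinA ((q :: qs).foldl pvStepA ([], pvMkD [] [] [] [] []))
        = ensure_question_diversity_py_alt (q :: qs)
      rw [pvFold]
      rw [ensure_question_diversity_py_alt]
      have hr : PySem.List.pyRange 0 (pvTable.length : Int) 1 = [0, 1, 2, 3, 4] := by decide
      rw [hr]
      simp only [pvFinA, pvMkD, PySem.Dict.values_mk, List.map_cons, List.map_nil,
        List.foldl_cons, List.foldl_nil, pvTakeIf, List.nil_append]
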